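-- pv_equiv track=rewrite | github.com/Matteo-Candi/Master-Thesis | benchmark/Python_formatted.py | is_valid_num
-- ===== SOURCE A (Python) =====
-- def is_valid_num(x):
--     mp = dict()
--     for i in range(len(x)):
--         if ord(x[i]) - ord("0") in mp:
--             return False
--         elif ord(x[i]) - ord("0") > 5:
--             return False
--         else:
--             mp[ord(x[i]) - ord("0")] = 1
--     return True
-- ===== SOURCE B (Python) =====
-- def is_valid_num(x):
--     vals = [ord(c) - ord("0") for c in x]
--     if not all(v <= 5 for v in vals):
--         return False
--     return len(set(vals)) == len(vals)
-- ===== Notes on version B (the rewrite author's own statement) =====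
-- stated objective: simpler
-- what changed: Replaces the incremental dict-membership loop with early returns by two whole-list passes: a bound check over the digit values, then a len(set)==len global uniqueness test.
import Mathlib
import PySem

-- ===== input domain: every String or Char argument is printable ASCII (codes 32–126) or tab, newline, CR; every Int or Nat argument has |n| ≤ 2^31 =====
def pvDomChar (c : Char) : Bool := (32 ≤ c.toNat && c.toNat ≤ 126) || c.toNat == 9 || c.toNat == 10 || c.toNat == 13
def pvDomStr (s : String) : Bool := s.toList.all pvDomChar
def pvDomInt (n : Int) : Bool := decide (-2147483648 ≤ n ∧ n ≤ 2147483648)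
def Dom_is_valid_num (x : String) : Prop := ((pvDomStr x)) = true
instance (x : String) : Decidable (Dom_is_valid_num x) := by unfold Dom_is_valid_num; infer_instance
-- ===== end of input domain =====

-- B replaces A's incremental dict-membership loop (early return on duplicate or value > 5)
-- by two whole-list passes: a bound check, then a set-size uniqueness comparison (objective: simpler).

-- ===== PORT A =====
-- the loop 'for i in range(len(x))' with early returns, carrying the dict mp
def isValidLoopA : List Char → PySem.Dict Int Int → Bool
  | [], _ => true
  | c :: rest, mp =>
    if mp.contains ((c.toNat : Int) - 48) then false
    else if ((c.toNat : Int) - 48) > 5 then false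
    else isValidLoopA rest (mp.insert ((c.toNat : Int) - 48) 1)

def is_valid_num (x : String) : Bool :=
  isValidLoopA x.toList PySem.Dict.empty

-- ===== PORT B =====
def is_valid_num_alt (x : String) : Bool :=
  let vals := x.toList.map (fun c => ((c.toNat : Int) - 48))
  if !(vals.all (fun v => decide (v ≤ 5))) then false
  else PySem.Set.len (PySem.Set.ofList vals) == vals.length

-- ===== PRECONDITION & SPEC =====
def Spec_is_valid_num (x : String) (out : Bool) : Prop := out = is_valid_num_alt x
instance (x : String) (out : Bool) : Decidable (Spec_is_valid_num x out) := by unfold Spec_is_valid_num; infer_instance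

-- ===== CLAIM (what is proved, stated in full; the proofs are below) =====
def Claim_equal_is_valid_num : Prop := ∀ (x : String), Dom_is_valid_num x → Spec_is_valid_num x (is_valid_num x)

-- ===== LEMMAS AND PROOFS =====

-- A's loop equals: all values ≤ 5, and the keys seen so far together with the values are duplicate-free
lemma loopA_eq (cs : List Char) (mp : PySem.Dict Int Int) (h : mp.keys.Nodup) :
    isValidLoopA cs mp =
      ((cs.map (fun c => ((c.toNat : Int) - 48))).all (fun v => decide (v ≤ 5)) &&
        decide ((mp.keys ++ cs.map (fun c => ((c.toNat : Int) - 48))).Nodup)) := by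
  induction cs generalizing mp with
  | nil => simp [isValidLoopA, h]
  | cons c rest ih =>
    by_cases hc : mp.contains ((c.toNat : Int) - 48) = true
    · have hmem : ((c.toNat : Int) - 48) ∈ mp.keys :=
        (PySem.Dict.contains_iff_mem_keys _ _).mp hc
      have hnd : ¬ (mp.keys ++ ((c.toNat : Int) - 48) :: rest.map (fun c => ((c.toNat : Int) - 48))).Nodup := by
        intro hnd
        exact (List.nodup_append.mp hnd).2.2 _ hmem _ (List.mem_cons_self) rfl
      simp [isValidLoopA, hc, hnd]
    · by_cases h5 : ((c.toNat : Int) - 48) > 5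
      · have hle : ¬ ((c.toNat : Int) - 48) ≤ 5 := by omega
        simp [isValidLoopA, hc, h5, hle]
      · have hle : ((c.toNat : Int) - 48) ≤ 5 := by omega
        have hcf : mp.contains ((c.toNat : Int) - 48) = false := by simpa using hc
        have hkeys := PySem.Dict.keys_insert_of_not_contains mp (1 : Int) hcf
        have hnd' : (mp.insert ((c.toNat : Int) - 48) 1).keys.Nodup :=
          PySem.Dict.nodup_keys_insert _ _ _ h
        have hassoc : mp.keys ++ [((c.toNat : Int) - 48)] ++ rest.map (fun c => ((c.toNat : Int) - 48))
            = mp.keys ++ ((c.toNat : Int) - 48) :: rest.map (fun c => ((c.toNat : Int) - 48)) := by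
          simp
        simp only [isValidLoopA, hc, Bool.false_eq_true, if_false, if_neg h5,
          ih _ hnd', hkeys, hassoc, List.map_cons, List.all_cons]
        simp only [hle, decide_true, Bool.true_and]
        rfl

-- set(xs ++ [a]) adds a at the end (a fold over an appended list)
lemma ofList_append_singleton (xs : List Int) (a : Int) :
    PySem.Set.ofList (xs ++ [a]) = PySem.Set.add (PySem.Set.ofList xs) a := by
  rw [PySem.Set.ofList_eq_foldl, PySem.Set.ofList_eq_foldl, List.foldl_append]
  rfl

-- set(vals) has the same size as vals exactly when vals has no duplicates
lemma ofList_length_eq_iff (vals : List Int) :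
    (PySem.Set.ofList vals).length = vals.length ↔ vals.Nodup := by
  induction vals using List.reverseRecOn with
  | nil => simp [PySem.Set.ofList]
  | append_singleton xs a ih =>
    rw [ofList_append_singleton, List.nodup_append]
    by_cases hmem : a ∈ xs
    · have hadd : PySem.Set.add (PySem.Set.ofList xs) a = PySem.Set.ofList xs := by
        unfold PySem.Set.add
        rw [if_pos]
        rw [PySem.Set.contains_iff]
        exact (PySem.Set.mem_ofList _ _).mpr hmem
      rw [hadd]
      have hle := PySem.Set.length_ofList_le xs
      simp only [List.length_append, List.length_singleton]
      constructor
      · intro hlen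
        exact absurd hlen (by omega)
      · rintro ⟨-, -, hdis⟩
        exact absurd rfl (hdis _ hmem _ (List.mem_cons_self))
    · have hadd : PySem.Set.add (PySem.Set.ofList xs) a = PySem.Set.ofList xs ++ [a] := by
        unfold PySem.Set.add
        rw [if_neg]
        intro hcx
        exact hmem ((PySem.Set.mem_ofList _ _).mp ((PySem.Set.contains_iff _ _).mp hcx))
      rw [hadd]
      simp only [List.length_append, List.length_singleton]
      constructor
      · intro hlen
        refine ⟨ih.mp (by omega), List.nodup_singleton a, ?_⟩
        intro y hy b hb
        simp only [List.mem_singleton] at hb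
        subst hb
        intro heq
        exact hmem (heq ▸ hy)
      · rintro ⟨h1, -, -⟩
        have := ih.mpr h1
        omega

-- ===== VERDICT (by name: the statement is the Claim_ definition above) =====
theorem is_valid_num_spec : Claim_equal_is_valid_num := by
  intro x _
  unfold Spec_is_valid_num is_valid_num is_valid_num_alt
  rw [loopA_eq _ _ (by simp [PySem.Dict.keys_empty])]
  simp only [PySem.Dict.keys_empty, List.nil_append]
  set vals := x.toList.map (fun c => ((c.toNat : Int) - 48)) with hv
  by_cases hall : vals.all (fun v => decide (v ≤ 5)) = true
  · have hbeq : (PySem.Set.len (PySem.Set.ofList vals) == (vals.length : Int))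
        = decide vals.Nodup := by
      by_cases hnd : vals.Nodup
      · simp [PySem.Set.len, (ofList_length_eq_iff vals).mpr hnd, hnd]
      · have hne : (PySem.Set.ofList vals).length ≠ vals.length :=
          fun hl => hnd ((ofList_length_eq_iff vals).mp hl)
        simp only [PySem.Set.len, hnd, decide_false, beq_eq_false_iff_ne, ne_eq]
        intro hcast
        exact hne (by exact_mod_cast hcast)
    simp only [hall, Bool.not_true, Bool.true_and, Bool.false_eq_true, if_false]
    exact hbeq.symm
  · simp [hall]
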